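-- pv_equiv track=rewrite | github.com/lukkelele/hacking | penetration-tools/bruteforce/allPasswordLengths.py | threeCharacters
-- ===== SOURCE A (Python) =====
-- def oneCharacter(dictionary):
--     variations = []
--
--     for i in dictionary:
--         variations.append(i)
--     return variations
--
-- def twoCharacters(dictionary):
--     old = oneCharacter(dictionary)
--     variations = []
--     for k in dictionary:
--         for i in dictionary:
--             combo = str(k+i)
--             variations.append(combo)
--     return variations+old
--
-- def threeCharacters(dictionary):
--     old = twoCharacters(dictionary)
--     variations = []
--     for k in dictionary:
--         for l in dictionary:
--             for i in dictionary:
--                 combo = str(k+l+i)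
--                 variations.append(combo)
--     return variations+old
-- ===== SOURCE B (Python) =====
-- def threeCharacters(dictionary):
--     d = list(dictionary)
--     n = len(d)
--     out = [d[m // (n * n)] + d[m // n % n] + d[m % n] for m in range(n ** 3)]
--     out += [d[m // n] + d[m % n] for m in range(n ** 2)]
--     out += [d[m] for m in range(n)]
--     return out
-- ===== Notes on version B (the rewrite author's own statement) =====
-- stated objective: alternative
-- what changed: Replaces the nested loops over the dictionary by a base-n (rank) enumeration: one flat pass over range(n**L) per length, decoding each counter value into word indices with // and %.
import Mathlib
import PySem

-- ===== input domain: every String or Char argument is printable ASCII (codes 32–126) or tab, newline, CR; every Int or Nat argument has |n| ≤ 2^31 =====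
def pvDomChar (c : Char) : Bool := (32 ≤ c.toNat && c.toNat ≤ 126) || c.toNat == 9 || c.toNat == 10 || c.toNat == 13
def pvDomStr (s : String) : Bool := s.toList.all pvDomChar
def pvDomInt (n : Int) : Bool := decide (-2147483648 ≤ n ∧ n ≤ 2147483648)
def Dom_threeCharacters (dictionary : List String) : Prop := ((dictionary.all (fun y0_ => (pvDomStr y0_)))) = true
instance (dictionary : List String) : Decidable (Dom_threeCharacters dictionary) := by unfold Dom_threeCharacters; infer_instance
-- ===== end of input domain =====

-- B enumerates each length by a single flat base-n counter pass (decoding indices with // and %) instead of nested loops; same output, an alternative algorithm.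
-- ===== PORT A =====
def oneCharacterA (dictionary : List String) : List String :=
  dictionary.foldl (fun variations i => variations ++ [i]) []

def twoCharactersA (dictionary : List String) : List String :=
  let old := oneCharacterA dictionary
  let variations := dictionary.foldl (fun v k =>
    dictionary.foldl (fun v i => v ++ [k ++ i]) v) []
  variations ++ old

def threeCharacters (dictionary : List String) : List String :=
  let old := twoCharactersA dictionary
  let variations := dictionary.foldl (fun v k =>
    dictionary.foldl (fun v l =>
      dictionary.foldl (fun v i => v ++ [k ++ l ++ i]) v) v) []
  variations ++ old

-- ===== PORT B =====
-- All counter values m and the divisor expressions are nonnegative, so Nat division and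
-- mod coincide exactly with Python's // and %; the indices m/(n*n), m/n % n, m % n are
-- always < n = d.length, so getD's default "" is never used (Python's d[...] never raises here).
def threeCharacters_alt (dictionary : List String) : List String :=
  (List.range (dictionary.length ^ 3)).map (fun m =>
    dictionary.getD (m / (dictionary.length * dictionary.length)) "" ++
      dictionary.getD (m / dictionary.length % dictionary.length) "" ++
      dictionary.getD (m % dictionary.length) "")
  ++ (List.range (dictionary.length ^ 2)).map (fun m =>
    dictionary.getD (m / dictionary.length) "" ++ dictionary.getD (m % dictionary.length) "")
  ++ (List.range dictionary.length).map (fun m => dictionary.getD m "")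

-- ===== PRECONDITION & SPEC =====
def Spec_threeCharacters (dictionary : List String) (out : List String) : Prop := out = threeCharacters_alt dictionary
instance (dictionary : List String) (out : List String) : Decidable (Spec_threeCharacters dictionary out) := by unfold Spec_threeCharacters; infer_instance

-- ===== CLAIM (what is proved, stated in full; the proofs are below) =====
def Claim_equal_threeCharacters : Prop := ∀ (dictionary : List String), Dom_threeCharacters dictionary → Spec_threeCharacters dictionary (threeCharacters dictionary)

-- ===== LEMMAS AND PROOFS =====
theorem pvFlattenMapSingleton {α β : Type} (f : α → β) (l : List α) :
    (l.map (fun x => [f x])).flatten = l.map f := by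
  induction l with
  | nil => rfl
  | cons a t ih => simp [ih]

theorem twoCharactersA_eq (d : List String) :
    twoCharactersA d = d.flatMap (fun k => d.map (fun i => k ++ i)) ++ d := by
  simp [twoCharactersA, oneCharacterA, List.flatMap, pvFlattenMapSingleton]

theorem threeCharacters_eq (d : List String) :
    threeCharacters d =
      d.flatMap (fun k => d.flatMap (fun l => d.map (fun i => k ++ l ++ i))) ++
        (d.flatMap (fun k => d.map (fun i => k ++ i)) ++ d) := by
  simp [threeCharacters, twoCharactersA_eq, List.flatMap, pvFlattenMapSingleton]

theorem pvMapRangeMul {α : Type} (a b : Nat) (f : Nat → α) :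
    (List.range (a * b)).map f
      = (List.range a).flatMap (fun i => (List.range b).map (fun j => f (i * b + j))) := by
  induction a with
  | zero => simp
  | succ a ih =>
    rw [Nat.succ_mul, List.range_add, List.map_append, ih, List.range_succ, List.flatMap_append]
    simp [List.map_map, Function.comp]

theorem pvMapRangeGetD {α : Type} (l : List α) (x : α) :
    (List.range l.length).map (fun i => l.getD i x) = l := by
  apply List.ext_getElem
  · simp
  · intro i h1 h2
    simp [List.getD_eq_getElem?_getD, List.getElem?_eq_getElem h2]

theorem pvFlatMapRangeGetD {α β : Type} (l : List α) (x : α) (g : α → List β) :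
    (List.range l.length).flatMap (fun i => g (l.getD i x)) = l.flatMap g := by
  have := congrArg (fun t => t.flatMap g) (pvMapRangeGetD l x)
  simpa [List.flatMap_map] using this

theorem pvPairsEq (d : List String) (pre : String) :
    (List.range (d.length ^ 2)).map
        (fun m => pre ++ d.getD (m / d.length) "" ++ d.getD (m % d.length) "")
      = d.flatMap (fun k => d.map (fun i => pre ++ k ++ i)) := by
  set n := d.length with hn
  rcases Nat.eq_zero_or_pos n with h0 | hpos
  · have hd : d = [] := by
      cases d with
      | nil => rfl
      | cons a t => simp [hn] at h0
    simp [hd, h0]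
  · have : n ^ 2 = n * n := by ring
    rw [this, pvMapRangeMul]
    have hcong : ∀ i ∈ List.range n,
        (List.range n).map (fun j => pre ++ d.getD ((i * n + j) / n) "" ++ d.getD ((i * n + j) % n) "")
          = (List.range n).map (fun j => pre ++ d.getD i "" ++ d.getD j "") := by
      intro i hi
      apply List.map_congr_left
      intro j hj
      have hj' : j < n := List.mem_range.mp hj
      have hdiv : (i * n + j) / n = i := by
        rw [Nat.mul_comm i n, Nat.mul_add_div hpos, Nat.div_eq_of_lt hj', Nat.add_zero]
      have hmod : (i * n + j) % n = j := by
        rw [Nat.mul_comm i n, Nat.mul_add_mod, Nat.mod_eq_of_lt hj']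
      rw [hdiv, hmod]
    rw [List.flatMap_congr hcong]
    calc (List.range n).flatMap (fun i => (List.range n).map (fun j => pre ++ d.getD i "" ++ d.getD j ""))
        = (List.range n).flatMap (fun i => d.map (fun c => pre ++ d.getD i "" ++ c)) := by
          apply List.flatMap_congr
          intro i _
          have := congrArg (fun t => t.map (fun c => pre ++ d.getD i "" ++ c)) (pvMapRangeGetD d "")
          simpa [List.map_map, Function.comp] using this
      _ = d.flatMap (fun k => d.map (fun i => pre ++ k ++ i)) := by
          exact pvFlatMapRangeGetD d "" (fun k => d.map (fun c => pre ++ k ++ c))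

theorem pvSinglesEq (d : List String) :
    (List.range d.length).map (fun m => d.getD m "") = d := pvMapRangeGetD d ""

theorem pvTriplesEq (d : List String) :
    (List.range (d.length ^ 3)).map
        (fun m => d.getD (m / (d.length * d.length)) "" ++ d.getD (m / d.length % d.length) "" ++ d.getD (m % d.length) "")
      = d.flatMap (fun k => d.flatMap (fun l => d.map (fun i => k ++ l ++ i))) := by
  set n := d.length with hn
  rcases Nat.eq_zero_or_pos n with h0 | hpos
  · have hd : d = [] := by
      cases d with
      | nil => rfl
      | cons a t => simp [hn] at h0
    simp [hd, h0]
  · have h3 : n ^ 3 = n * (n * n) := by ring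
    rw [h3, pvMapRangeMul]
    have hcong : ∀ i ∈ List.range n,
        (List.range (n * n)).map (fun j =>
            d.getD ((i * (n * n) + j) / (n * n)) "" ++ d.getD ((i * (n * n) + j) / n % n) "" ++ d.getD ((i * (n * n) + j) % n) "")
          = (List.range (n ^ 2)).map (fun j =>
            d.getD i "" ++ d.getD (j / n) "" ++ d.getD (j % n) "") := by
      intro i hi
      have h2 : n ^ 2 = n * n := by ring
      rw [h2]
      apply List.map_congr_left
      intro j hj
      have hj' : j < n * n := List.mem_range.mp hj
      have hnn : 0 < n * n := Nat.mul_pos hpos hpos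
      have hdiv : (i * (n * n) + j) / (n * n) = i := by
        rw [Nat.mul_comm i (n * n), Nat.mul_add_div hnn, Nat.div_eq_of_lt hj', Nat.add_zero]
      have hdivn : (i * (n * n) + j) / n = i * n + j / n := by
        rw [Nat.mul_comm i (n * n), Nat.mul_assoc, Nat.mul_add_div hpos, Nat.mul_comm n i]
      have hjn : j / n < n := Nat.div_lt_of_lt_mul hj'
      have hmid : (i * (n * n) + j) / n % n = j / n := by
        rw [hdivn, Nat.mul_comm i n, Nat.mul_add_mod, Nat.mod_eq_of_lt hjn]
      have hlast : (i * (n * n) + j) % n = j % n := by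
        have he : i * (n * n) + j = n * (i * n) + j := by ring
        rw [he, Nat.mul_add_mod]
      rw [hdiv, hmid, hlast]
    rw [List.flatMap_congr hcong]
    have hinner : ∀ i ∈ List.range n,
        (List.range (n ^ 2)).map (fun j => d.getD i "" ++ d.getD (j / n) "" ++ d.getD (j % n) "")
          = d.flatMap (fun l => d.map (fun c => d.getD i "" ++ l ++ c)) := by
      intro i _
      exact pvPairsEq d (d.getD i "")
    rw [List.flatMap_congr hinner]
    exact pvFlatMapRangeGetD d "" (fun k => d.flatMap (fun l => d.map (fun i => k ++ l ++ i)))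

-- ===== VERDICT (by name: the statement is the Claim_ definition above) =====
theorem threeCharacters_spec : Claim_equal_threeCharacters := by
  intro d _
  unfold Spec_threeCharacters threeCharacters_alt
  rw [threeCharacters_eq]
  have hp := pvPairsEq d ""
  simp only [String.empty_append] at hp
  rw [pvTriplesEq, pvSinglesEq, hp, List.append_assoc]
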